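-- pv_equiv track=rewrite | github.com/venturebnb/allRank | data_processing/process.py | flatten_groups
-- ===== SOURCE A (Python) =====
-- def flatten_groups(grouped_rankings):
--     ranking_groups = []
--
--     for search_date, search_date_grouped_items in grouped_rankings.items():
--         for _, check_in_grouped_items in search_date_grouped_items.items():
--             for _, duration_grouped_items in check_in_grouped_items.items():
--                 for _, guest_count_grouped_items in duration_grouped_items.items():
--                     ranking_groups.append(guest_count_grouped_items[:])
--
--     return ranking_groups
-- ===== SOURCE B (Python) =====
-- def flatten_groups(grouped_rankings):
--     # Level-wise flattening: descend one dict level per pass, then copy leaves.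
--     level = [grouped_rankings]
--     for _ in range(4):
--         level = [v for d in level for v in d.values()]
--     return [x[:] for x in level]
-- ===== Notes on version B (the rewrite author's own statement) =====
-- stated objective: alternative
-- what changed: Replaced the four nested for-loops with an append accumulator by a breadth-first level-wise flattening: a working list of dicts is flat-mapped through .values() once per nesting level, then the leaf lists are copied.
import Mathlib
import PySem

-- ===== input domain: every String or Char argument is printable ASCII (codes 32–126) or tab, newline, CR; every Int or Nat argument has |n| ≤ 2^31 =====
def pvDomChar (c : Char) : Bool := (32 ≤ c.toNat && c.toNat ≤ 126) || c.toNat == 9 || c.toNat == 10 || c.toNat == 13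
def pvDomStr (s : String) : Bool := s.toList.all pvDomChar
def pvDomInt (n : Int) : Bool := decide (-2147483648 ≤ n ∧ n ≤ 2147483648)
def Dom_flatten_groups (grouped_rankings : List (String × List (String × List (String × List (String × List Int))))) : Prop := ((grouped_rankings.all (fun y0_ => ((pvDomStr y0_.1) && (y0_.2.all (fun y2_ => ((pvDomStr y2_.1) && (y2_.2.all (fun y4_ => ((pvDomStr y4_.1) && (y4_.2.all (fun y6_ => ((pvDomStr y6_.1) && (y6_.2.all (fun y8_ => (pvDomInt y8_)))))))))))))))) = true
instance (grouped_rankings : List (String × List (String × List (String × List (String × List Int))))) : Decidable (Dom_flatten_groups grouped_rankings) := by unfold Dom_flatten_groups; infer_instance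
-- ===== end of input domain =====

-- ===== PORT A =====
-- Four nested loops over the dicts' items, appending a copy of each leaf list.
def flatten_groups (grouped_rankings : List (String × List (String × List (String × List (String × List Int))))) : List (List Int) :=
  grouped_rankings.foldl (fun acc p1 =>
    p1.2.foldl (fun acc p2 =>
      p2.2.foldl (fun acc p3 =>
        p3.2.foldl (fun acc p4 =>
          -- guest_count_grouped_items[:]: a full-slice copy, value-equal to the list
          acc ++ [p4.2]) acc) acc) acc) []

-- ===== PORT B =====
-- Source B: level-wise descent; one flatMap over .values() per dict level, then copy leaves
def flatten_groups_alt (grouped_rankings : List (String × List (String × List (String × List (String × List Int))))) : List (List Int) :=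
  let l1 := [grouped_rankings].flatMap (fun d => d.map Prod.snd)
  let l2 := l1.flatMap (fun d => d.map Prod.snd)
  let l3 := l2.flatMap (fun d => d.map Prod.snd)
  let l4 := l3.flatMap (fun d => d.map Prod.snd)
  l4.map (fun x => x)  -- x[:] copies each leaf; value-equal to x

-- ===== PRECONDITION & SPEC =====
def Spec_flatten_groups (grouped_rankings : List (String × List (String × List (String × List (String × List Int))))) (out : List (List Int)) : Prop := out = flatten_groups_alt grouped_rankings
instance (grouped_rankings : List (String × List (String × List (String × List (String × List Int))))) (out : List (List Int)) : Decidable (Spec_flatten_groups grouped_rankings out) := by unfold Spec_flatten_groups; infer_instance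

-- ===== CLAIM (what is proved, stated in full; the proofs are below) =====
def Claim_equal_flatten_groups : Prop := ∀ (grouped_rankings : List (String × List (String × List (String × List (String × List Int))))), Dom_flatten_groups grouped_rankings → Spec_flatten_groups grouped_rankings (flatten_groups grouped_rankings)

-- ===== LEMMAS AND PROOFS =====

-- ===== VERDICT (by name: the statement is the Claim_ definition above) =====
-- Innermost loop of A: append each leaf list.
lemma pv_l4 (l : List (String × List Int)) (acc : List (List Int)) :
    l.foldl (fun acc p4 => acc ++ [p4.2]) acc = acc ++ l.map Prod.snd :=
  PySem.List.foldl_append_singleton_eq_map _ _ _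

-- Third loop of A in flatMap form.
lemma pv_l3 (l : List (String × List (String × List Int))) (acc : List (List Int)) :
    l.foldl (fun acc p3 => p3.2.foldl (fun acc p4 => acc ++ [p4.2]) acc) acc
    = acc ++ l.flatMap (fun p3 => p3.2.map Prod.snd) := by
  induction l generalizing acc with
  | nil => simp
  | cons h t ih => rw [List.foldl_cons, pv_l4, ih]; simp only [List.flatMap_cons, List.append_assoc]

-- Second loop of A in flatMap form.
lemma pv_l2 (l : List (String × List (String × List (String × List Int))))
    (acc : List (List Int)) :
    l.foldl (fun acc p2 =>
      p2.2.foldl (fun acc p3 =>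
        p3.2.foldl (fun acc p4 => acc ++ [p4.2]) acc) acc) acc
    = acc ++ l.flatMap (fun p2 => p2.2.flatMap (fun p3 => p3.2.map Prod.snd)) := by
  induction l generalizing acc with
  | nil => simp
  | cons h t ih => rw [List.foldl_cons, pv_l3, ih]; simp only [List.flatMap_cons, List.append_assoc]

-- Outermost loop of A in flatMap form.
lemma pv_l1 (l : List (String × List (String × List (String × List (String × List Int)))))
    (acc : List (List Int)) :
    l.foldl (fun acc p1 =>
      p1.2.foldl (fun acc p2 =>
        p2.2.foldl (fun acc p3 =>
          p3.2.foldl (fun acc p4 => acc ++ [p4.2]) acc) acc) acc) acc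
    = acc ++ l.flatMap (fun p1 =>
        p1.2.flatMap (fun p2 => p2.2.flatMap (fun p3 => p3.2.map Prod.snd))) := by
  induction l generalizing acc with
  | nil => simp
  | cons h t ih => rw [List.foldl_cons, pv_l2, ih]; simp only [List.flatMap_cons, List.append_assoc]

-- A's loops (now a nested flatMap) equal B's chain of flatMaps, reassociating.
theorem flatten_groups_spec : Claim_equal_flatten_groups := by
  intro g _
  unfold Spec_flatten_groups flatten_groups flatten_groups_alt
  rw [pv_l1]
  simp only [List.nil_append, List.flatMap_cons, List.flatMap_nil, List.append_nil,
    List.map_id_fun', id, List.flatMap_map, List.flatMap_assoc, Function.comp]
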